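-- pv_equiv track=rewrite | github.com/Riverscapes/RaveAddIn | RaveAddIn/ConversionScripts/Convert_pyBRAT.py | search_for_key
-- ===== SOURCE A (Python) =====
-- def search_for_key(all_files, keys, excludes=[]):
--
--     stripped_files = []
--     for file in all_files:
--         stripped_files.append(file.split("\\")[-1])
--
--     for key in keys:
--
--         to_return = [s for s in stripped_files if key in s]
--
--         for exclude in excludes:
--             bad_list = [s for s in stripped_files if exclude in s]
--             for bad_item in bad_list:
--                 while bad_item in to_return:
--                     to_return.remove(bad_item)
--
--         if len(to_return) > 0:
--             return all_files[stripped_files.index(to_return[0])]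
--
--     return "COULD NOT FIND"
-- ===== SOURCE B (Python) =====
-- def search_for_key(all_files, keys, excludes=[]):
--     # Filter once: keep (full_path, basename) pairs whose basename contains no exclude,
--     # then scan keys in order and return the first kept full path whose basename contains the key.
--     kept = []
--     for f in all_files:
--         base = f.split("\\")[-1]
--         if not any(e in base for e in excludes):
--             kept.append((f, base))
--     for key in keys:
--         for full, base in kept:
--             if key in base:
--                 return full
--     return "COULD NOT FIND"
-- ===== Notes on version B (the rewrite author's own statement) =====
-- stated objective: faster
-- what changed: Replaces A's per-key rebuild of the candidate list with its nested bad_list/while-remove passes (and the final list.index lookup) by one upfront filter producing (full_path, basename) pairs containing no exclude, followed by a plain first-match scan per key.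
import Mathlib
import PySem

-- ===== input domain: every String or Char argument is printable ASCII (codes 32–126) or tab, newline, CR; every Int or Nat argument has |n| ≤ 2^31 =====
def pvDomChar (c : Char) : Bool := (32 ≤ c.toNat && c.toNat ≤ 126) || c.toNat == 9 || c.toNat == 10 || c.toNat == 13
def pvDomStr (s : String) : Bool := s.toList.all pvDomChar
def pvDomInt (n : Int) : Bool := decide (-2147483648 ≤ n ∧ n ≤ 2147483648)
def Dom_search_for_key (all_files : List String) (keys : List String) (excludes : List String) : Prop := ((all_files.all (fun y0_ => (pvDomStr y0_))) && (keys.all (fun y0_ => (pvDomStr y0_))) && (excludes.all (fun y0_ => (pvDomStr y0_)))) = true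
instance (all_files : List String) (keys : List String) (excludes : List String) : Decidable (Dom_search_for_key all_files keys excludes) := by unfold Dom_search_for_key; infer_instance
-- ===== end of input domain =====

-- B replaces A's per-key rebuild with nested while/remove passes by one upfront
-- exclude-filter over (full_path, basename) pairs followed by a plain first-match scan.

-- ===== PORT A =====
-- shared helper: file.split("\\")[-1]; split? is some (sep ≠ "") and never empty, so the defaults are unreachable
def pvBase (f : String) : String :=
  PySem.List.pyGetD ((PySem.Str.split? f "\\").getD [f]) (-1) ""

-- used by pvWhileRemove's termination proof
theorem pvRemove?_length {xs l' : List String} {v : String}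
    (h : PySem.List.remove? xs v = some l') : l'.length < xs.length := by
  have hv : v ∈ xs := by
    by_contra hv
    rw [(PySem.List.remove?_eq_none_iff xs v).mpr hv] at h
    simp at h
  rw [PySem.List.remove?_eq_some_erase xs v hv] at h
  cases h
  have := List.length_erase_of_mem hv
  have : 0 < xs.length := List.length_pos_of_mem hv
  omega

-- while bad_item in to_return: to_return.remove(bad_item)
def pvWhileRemove (tr : List String) (bad : String) : List String :=
  match h : PySem.List.remove? tr bad with
  | some tr' => pvWhileRemove tr' bad
  | none => tr
termination_by tr.length
decreasing_by exact pvRemove?_length h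

def pvKeyLoopA (all_files stripped_files excludes : List String) : List String → String
  | [] => "COULD NOT FIND"
  | key :: rest =>
    let to_return := stripped_files.filter (fun s => PySem.Str.isIn key s)
    let to_return := excludes.foldl (fun tr exclude =>
        (stripped_files.filter (fun s => PySem.Str.isIn exclude s)).foldl pvWhileRemove tr) to_return
    if 0 < to_return.length then
      match PySem.List.index? stripped_files (PySem.List.pyGetD to_return 0 "") with
      | some i => PySem.List.pyGetD all_files (i : Int) ""
      | none => ""  -- unreachable: to_return[0] is an element of stripped_files
    else pvKeyLoopA all_files stripped_files excludes rest

def search_for_key (all_files : List String) (keys : List String) (excludes : List String) : String :=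
  let stripped_files := all_files.foldl (fun acc file => acc ++ [pvBase file]) []
  pvKeyLoopA all_files stripped_files excludes keys

-- ===== PORT B =====
def pvKeyLoopB (kept : List (String × String)) : List String → String
  | [] => "COULD NOT FIND"
  | key :: rest =>
    match kept.find? (fun p => PySem.Str.isIn key p.2) with
    | some p => p.1
    | none => pvKeyLoopB kept rest

def search_for_key_alt (all_files : List String) (keys : List String) (excludes : List String) : String :=
  let kept := all_files.foldl (fun acc f =>
      let base := pvBase f
      if !(excludes.any (fun e => PySem.Str.isIn e base)) then acc ++ [(f, base)] else acc) []
  pvKeyLoopB kept keys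

-- ===== PRECONDITION & SPEC =====
def Spec_search_for_key (all_files : List String) (keys : List String) (excludes : List String) (out : String) : Prop := out = search_for_key_alt all_files keys excludes
instance (all_files : List String) (keys : List String) (excludes : List String) (out : String) : Decidable (Spec_search_for_key all_files keys excludes out) := by unfold Spec_search_for_key; infer_instance

-- ===== CLAIM (what is proved, stated in full; the proofs are below) =====
def Claim_equal_search_for_key : Prop := ∀ (all_files : List String) (keys : List String) (excludes : List String), Dom_search_for_key all_files keys excludes → Spec_search_for_key all_files keys excludes (search_for_key all_files keys excludes)

-- ===== LEMMAS AND PROOFS =====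

def pvGood (excludes : List String) (b : String) : Bool :=
  !(excludes.any (fun e => PySem.Str.isIn e b))

theorem pvFilterNeErase (b : String) : ∀ l : List String,
    (l.erase b).filter (fun x => x != b) = l.filter (fun x => x != b) := by
  intro l
  induction l with
  | nil => simp
  | cons a l ih =>
    by_cases h : a = b
    · subst h; simp [List.erase_cons_head]
    · rw [List.erase_cons_tail (by simpa using h)]
      simp only [List.filter_cons, ih]

theorem pvWhileRemove_eq (bad : String) : ∀ tr : List String,
    pvWhileRemove tr bad = tr.filter (fun x => x != bad) := by
  intro tr
  fun_induction pvWhileRemove tr bad with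
  | case1 tr tr' h ih =>
    have hm : bad ∈ tr := by
      by_contra hm
      rw [(PySem.List.remove?_eq_none_iff tr bad).mpr hm] at h
      simp at h
    rw [PySem.List.remove?_eq_some_erase tr bad hm] at h
    cases h
    rw [ih, pvFilterNeErase]
  | case2 tr h =>
    have hm : bad ∉ tr := (PySem.List.remove?_eq_none_iff tr bad).mp h
    refine (List.filter_eq_self.mpr fun x hx => ?_).symm
    have hne : x ≠ bad := fun hxb => hm (hxb ▸ hx)
    simpa using hne

theorem pvFoldRemove_eq (bads : List String) : ∀ tr : List String,
    bads.foldl pvWhileRemove tr = tr.filter (fun x => !(bads.contains x)) := by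
  induction bads with
  | nil => intro tr; simp
  | cons b bs ih =>
    intro tr
    simp only [List.foldl_cons, pvWhileRemove_eq, ih, List.filter_filter]
    refine List.filter_congr fun x _ => ?_
    by_cases hxb : x = b
    · subst hxb; simp
    · simp [bne_iff_ne, hxb]

-- one exclude pass over a sublist of sf
theorem pvExcludePass_eq (sf : List String) (e : String) (p : String → Bool) :
    (sf.filter (fun s => PySem.Str.isIn e s)).foldl pvWhileRemove (sf.filter p)
      = sf.filter (fun x => p x && !(PySem.Str.isIn e x)) := by
  rw [pvFoldRemove_eq, List.filter_filter]
  refine List.filter_congr fun x hx => ?_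
  have hc : ((sf.filter (fun s => PySem.Str.isIn e s)).contains x) = PySem.Str.isIn e x := by
    cases hq : PySem.Str.isIn e x with
    | true => exact List.elem_eq_true_of_mem (List.mem_filter.mpr ⟨hx, hq⟩)
    | false =>
      have hq' : PySem.Chars.isIn e.toList x.toList = false := by simpa using hq
      have : x ∉ sf.filter (fun s => PySem.Str.isIn e s) := fun hm =>
        by simpa [hq'] using (List.mem_filter.mp hm).2
      simpa using this
  rw [hc]
  cases hp : p x <;> cases hq : PySem.Str.isIn e x <;> simp

theorem pvExcludesFold_eq (sf : List String) (excludes : List String) : ∀ p : String → Bool,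
    excludes.foldl (fun tr exclude =>
        (sf.filter (fun s => PySem.Str.isIn exclude s)).foldl pvWhileRemove tr) (sf.filter p)
      = sf.filter (fun x => p x && pvGood excludes x) := by
  induction excludes with
  | nil =>
    intro p
    simp only [List.foldl_nil]
    refine List.filter_congr fun x _ => ?_
    simp [pvGood]
  | cons e es ih =>
    intro p
    simp only [List.foldl_cons, pvExcludePass_eq]
    rw [ih]
    refine List.filter_congr fun x _ => ?_
    simp [pvGood, Bool.and_assoc]

theorem pvKeptFold_eq (excludes : List String) : ∀ (af : List String) (acc : List (String × String)),
    af.foldl (fun acc f =>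
      let base := pvBase f
      if !(excludes.any (fun e => PySem.Str.isIn e base)) then acc ++ [(f, base)] else acc) acc
    = acc ++ (af.map (fun f => (f, pvBase f))).filter (fun p => pvGood excludes p.2) := by
  intro af
  induction af with
  | nil => simp
  | cons f rest ih =>
    intro acc
    simp only [List.foldl_cons, List.map_cons, List.filter_cons, ih, pvGood]
    by_cases h : (excludes.any fun e => PySem.Str.isIn e (pvBase f)) = true <;>
      simp only [h, Bool.not_true, Bool.not_false] <;> simp

theorem pvStripped_eq : ∀ (af : List String) (acc : List String),
    af.foldl (fun acc file => acc ++ [pvBase file]) acc = acc ++ af.map pvBase := by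
  intro af
  induction af with
  | nil => simp
  | cons f rest ih => intro acc; simp [List.foldl_cons, ih]

-- per-key step: A's filter/index/fetch equals B's find? over the kept pairs
theorem pvKeyStep (key : String) (excludes : List String) : ∀ af : List String,
    (match (af.map pvBase).filter (fun x => PySem.Str.isIn key x && pvGood excludes x) with
     | [] => none
     | b :: _ =>
        some (match PySem.List.index? (af.map pvBase) b with
              | some i => PySem.List.pyGetD af (i : Int) ""
              | none => ""))
    = (((af.map (fun f => (f, pvBase f))).filter (fun p => pvGood excludes p.2)).find?
        (fun p => PySem.Str.isIn key p.2)).map Prod.fst := by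
  intro af
  induction af with
  | nil => simp
  | cons f rest ih =>
    by_cases hq : (PySem.Str.isIn key (pvBase f) && pvGood excludes (pvBase f)) = true
    · have hk : PySem.Str.isIn key (pvBase f) = true := (Bool.and_eq_true_iff.mp hq).1
      have hg : pvGood excludes (pvBase f) = true := (Bool.and_eq_true_iff.mp hq).2
      simp only [List.map_cons, List.filter_cons, hk, hg, Bool.and_self, if_true,
        PySem.List.index?_cons_self, List.find?_cons, Option.map_some]
      simp [PySem.List.pyGetD_zero_cons]
    · -- head fails the combined predicate
      have hqf : (PySem.Str.isIn key (pvBase f) && pvGood excludes (pvBase f)) = false :=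
        Bool.eq_false_iff.mpr hq
      have hr : (((f, pvBase f) :: (rest.map (fun f => (f, pvBase f)))).filter
            (fun p => pvGood excludes p.2)).find? (fun p => PySem.Str.isIn key p.2)
          = ((rest.map (fun f => (f, pvBase f))).filter
            (fun p => pvGood excludes p.2)).find? (fun p => PySem.Str.isIn key p.2) := by
        cases hg : pvGood excludes (pvBase f) with
        | false => simp only [List.filter_cons, hg, Bool.false_eq_true, ite_false]
        | true =>
          have hk : PySem.Str.isIn key (pvBase f) = false := by
            cases hk : PySem.Str.isIn key (pvBase f)
            · rfl
            · exact absurd (hqf.symm.trans (by rw [hk, hg]; rfl)) Bool.false_ne_true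
          simp only [List.filter_cons, hg, if_true, List.find?_cons, hk]
      simp only [List.map_cons]
      rw [hr]
      simp only [List.filter_cons, hqf, Bool.false_eq_true, ite_false]
      cases htr : (rest.map pvBase).filter
          (fun x => PySem.Str.isIn key x && pvGood excludes x) with
      | nil =>
        simp only [htr] at ih ⊢
        exact ih
      | cons b tl =>
        have hbmem : b ∈ (rest.map pvBase).filter
            (fun x => PySem.Str.isIn key x && pvGood excludes x) := by
          rw [htr]; exact List.mem_cons_self
        have hbq : (PySem.Str.isIn key b && pvGood excludes b) = true :=
          (List.mem_filter.mp hbmem).2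
        have hb0 : pvBase f ≠ b := fun h =>
          absurd (hqf.symm.trans (by rw [h]; exact hbq)) Bool.false_ne_true
        have hbsf : b ∈ rest.map pvBase := (List.mem_filter.mp hbmem).1
        obtain ⟨i, hi⟩ := Option.isSome_iff_exists.mp
          ((PySem.List.index?_isSome_iff (rest.map pvBase) b).mpr hbsf)
        simp only [htr] at ih ⊢
        rw [hi] at ih
        simp only [PySem.List.index?_cons_of_ne _ hb0, hi, Option.map_some]
        rw [← ih]
        congr 1
        rw [PySem.List.pyGetD_natCast]
        simp [List.getD]

theorem pvLoops_eq (excludes : List String) (af : List String) : ∀ keys : List String,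
    pvKeyLoopA af (af.map pvBase) excludes keys
      = pvKeyLoopB ((af.map (fun f => (f, pvBase f))).filter (fun p => pvGood excludes p.2)) keys := by
  intro keys
  induction keys with
  | nil => rfl
  | cons key rest ih =>
    rw [pvKeyLoopA, pvKeyLoopB]
    simp only [pvExcludesFold_eq]
    have hstep := pvKeyStep key excludes af
    cases htr : (af.map pvBase).filter
        (fun x => PySem.Str.isIn key x && pvGood excludes x) with
    | nil =>
      rw [htr] at hstep
      have hf : ((af.map (fun f => (f, pvBase f))).filter (fun p => pvGood excludes p.2)).find?
          (fun p => PySem.Str.isIn key p.2) = none := by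
        cases hfind : ((af.map (fun f => (f, pvBase f))).filter (fun p => pvGood excludes p.2)).find?
            (fun p => PySem.Str.isIn key p.2)
        · rfl
        · rw [hfind] at hstep; simp at hstep
      rw [hf]
      simpa [htr] using ih
    | cons b tl =>
      rw [htr] at hstep
      cases hfind : ((af.map (fun f => (f, pvBase f))).filter (fun p => pvGood excludes p.2)).find?
          (fun p => PySem.Str.isIn key p.2) with
      | none => rw [hfind] at hstep; simp at hstep
      | some p =>
        rw [hfind] at hstep
        simp only [Option.map_some, Option.some_inj] at hstep
        simp only [List.length_cons, PySem.List.pyGetD_zero_cons]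
        rw [if_pos (Nat.succ_pos _)]
        exact hstep

-- ===== VERDICT (by name: the statement is the Claim_ definition above) =====
theorem search_for_key_spec : Claim_equal_search_for_key := by
  intro af keys excludes _
  unfold Spec_search_for_key search_for_key search_for_key_alt
  simp only [pvStripped_eq, pvKeptFold_eq, List.nil_append]
  exact pvLoops_eq excludes af keys
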